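-- pv_equiv track=rewrite | github.com/PedroJuanSoto/Diagonal-Test | true_recovery_for_n8.py | r_col
-- ===== SOURCE A (Python) =====
-- def r_col(i,n):
-- 	if i > n:
-- 		return 0
-- 	elif i == 1:
-- 		return n
-- 	elif i <= n//2:
-- 		return 2*r_col(i,n//2)
-- 	elif i<= n:
-- 		return r_col(i-n//2,n//2)
-- 	else:
-- 		return 0
-- ===== SOURCE B (Python) =====
-- def r_col(i, n):
--     # staged: first materialise the halving chain, then a single scan over it
--     halves = [n]
--     while halves[-1] > 1:
--         halves.append(halves[-1] // 2)
--     d = 0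
--     for m in halves:
--         if i > m:
--             return 0
--         if i == 1:
--             return (2 ** d) * m
--         h = m // 2
--         if i <= h:
--             d += 1
--         else:
--             i -= h
--     return 0
-- ===== Notes on version B (the rewrite author's own statement) =====
-- stated objective: alternative
-- what changed: B replaces the tail recursion by two staged passes: it first materialises the halving chain n, n//2, ... as an explicit list, then scans that list once counting doublings d and returns 2**d times the level at which i hits 1.
import Mathlib
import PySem

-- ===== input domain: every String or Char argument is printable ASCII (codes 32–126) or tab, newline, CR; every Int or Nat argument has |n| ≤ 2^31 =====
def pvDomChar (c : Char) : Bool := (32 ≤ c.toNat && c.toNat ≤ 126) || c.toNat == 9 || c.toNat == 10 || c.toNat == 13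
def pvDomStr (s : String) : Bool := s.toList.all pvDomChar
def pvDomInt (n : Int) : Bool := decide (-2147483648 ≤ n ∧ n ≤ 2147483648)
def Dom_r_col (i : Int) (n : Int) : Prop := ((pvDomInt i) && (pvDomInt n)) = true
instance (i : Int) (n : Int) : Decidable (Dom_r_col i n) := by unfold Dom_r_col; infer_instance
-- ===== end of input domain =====

-- B materialises the halving chain as a list and scans it once with a doubling counter
-- (alternative decomposition, same cost); equivalence is about the return value only.


-- ===== PORT A =====
-- literal transliteration of A's recursion; fuel only makes the recursion total
-- (inside Pre_ the fuel n.toNat + 1 is always sufficient, proved below)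
def r_col_fuel : Nat → Int → Int → Int
  | 0, _, _ => 0
  | f + 1, i, n =>
    if i > n then 0
    else if i = 1 then n
    else if i ≤ PySem.Int.floordiv n 2 then 2 * r_col_fuel f i (PySem.Int.floordiv n 2)
    else if i ≤ n then r_col_fuel f (i - PySem.Int.floordiv n 2) (PySem.Int.floordiv n 2)
    else 0

def r_col (i : Int) (n : Int) : Int := r_col_fuel (n.toNat + 1) i n

-- ===== PORT B =====
-- Source B's first pass: the halving chain n, n//2, … stopping once the last element is ≤ 1
-- (fuel only bounds the while-loop; n.toNat + 1 is always sufficient)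
def pvHalves : Nat → Int → List Int
  | 0, m => [m]
  | f + 1, m =>
    if m > 1 then m :: pvHalves f (PySem.Int.floordiv m 2) else [m]

-- Source B's second pass: the for-loop over the chain, carrying (i, d)
def pvScan : List Int → Int → Nat → Int
  | [], _, _ => 0
  | m :: rest, i, d =>
    if i > m then 0
    else if i = 1 then 2 ^ d * m
    else
      let h := PySem.Int.floordiv m 2
      if i ≤ h then pvScan rest i (d + 1) else pvScan rest (i - h) d

def r_col_alt (i : Int) (n : Int) : Int := pvScan (pvHalves (n.toNat + 1) n) i 0

-- ===== PRECONDITION & SPEC =====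
-- Pre_ excludes exactly the inputs (i ≤ 0 ∧ i ≤ n) on which the Python A never returns
-- (RecursionError); it admits every input on which A returns a value.
def Pre_r_col (i : Int) (n : Int) : Prop := 1 ≤ i ∨ n < i
instance (i : Int) (n : Int) : Decidable (Pre_r_col i n) := by unfold Pre_r_col; infer_instance

def pvWitness_r_col : Int × Int := (3, 8)

def Spec_r_col (i : Int) (n : Int) (out : Int) : Prop := out = r_col_alt i n
instance (i : Int) (n : Int) (out : Int) : Decidable (Spec_r_col i n out) := by unfold Spec_r_col; infer_instance

-- ===== CLAIM (what is proved, stated in full; the proofs are below) =====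
def Claim_equal_r_col : Prop := ∀ (i : Int) (n : Int), Dom_r_col i n → Pre_r_col i n → Spec_r_col i n (r_col i n)

-- ===== LEMMAS AND PROOFS =====

-- key invariant: with sufficient fuel, scanning the halving chain from counter d
-- computes 2^d times A's recursive value
lemma pvScan_halves_eq (f : Nat) : ∀ (i m : Int) (d : Nat), (1 ≤ i ∨ m < i) → m.toNat < f →
    pvScan (pvHalves f m) i d = 2 ^ d * r_col_fuel f i m := by
  induction f with
  | zero => intro i m d _ h; omega
  | succ f ih =>
    intro i m d hpre _
    by_cases hm : m > 1
    · simp only [pvHalves, if_pos hm, pvScan, r_col_fuel]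
      by_cases hgt : i > m
      · simp [hgt]
      · simp only [if_neg hgt]
        by_cases h1 : i = 1
        · simp [h1]
        · simp only [if_neg h1]
          have hi2 : 2 ≤ i := by omega
          have hfd : PySem.Int.floordiv m 2 = m / 2 :=
            PySem.Int.floordiv_eq_ediv_of_pos (by omega)
          have hhalf1 : 1 ≤ m / 2 := by omega
          have hhalfm : m / 2 < m := by omega
          have hfuel : (m / 2).toNat < f := by omega
          by_cases hle : i ≤ PySem.Int.floordiv m 2
          · rw [if_pos hle, if_pos hle, hfd, ih i (m / 2) (d + 1) (Or.inl (by omega)) hfuel]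
            ring
          · rw [if_neg hle, if_neg hle, if_pos (by omega : i ≤ m), hfd,
              ih (i - m / 2) (m / 2) d (Or.inl (by rw [hfd] at hle; omega)) hfuel]
    · -- m ≤ 1: the chain is the single level [m]
      simp only [pvHalves, if_neg hm, pvScan, r_col_fuel]
      by_cases hgt : i > m
      · simp [hgt]
      · simp only [if_neg hgt]
        by_cases h1 : i = 1
        · simp [h1]
        · omega   -- 1 ≤ i, i ≠ 1, i ≤ m ≤ 1 is impossible

-- ===== VERDICT (by name: the statement is the Claim_ definition above) =====
theorem r_col_spec : Claim_equal_r_col := by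
  intro i n _ hpre
  unfold Spec_r_col r_col r_col_alt
  rw [pvScan_halves_eq (n.toNat + 1) i n 0 hpre (by omega), pow_zero, one_mul]
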